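-- pv_equiv track=rewrite | github.com/spassignat/james | parsers/parsers/lang/html_analyzer.py | _count_semantic_elements
-- ===== SOURCE A (Python) =====
-- from typing import Dict, List, Any
--
-- def _count_semantic_elements(elements: List[Dict]) -> Dict[str, int]:
--     """Compte les éléments sémantiques"""
--     semantic_tags = [
--         'header', 'footer', 'nav', 'main', 'article',
--         'section', 'aside', 'figure', 'figcaption',
--         'time', 'mark', 'summary', 'details'
--     ]
--     counts = {}
--
--     for tag in semantic_tags:
--         count = sum(1 for element in elements
--                     if element['tag'] == tag and not element.get('is_closing'))
--         if count > 0: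
--             counts[tag] = count
--
--     return counts
-- ===== SOURCE B (Python) =====
-- def _count_semantic_elements(elements):
--     """Compte les éléments sémantiques"""
--     semantic_tags = [
--         'header', 'footer', 'nav', 'main', 'article',
--         'section', 'aside', 'figure', 'figcaption',
--         'time', 'mark', 'summary', 'details'
--     ]
--     wanted = set(semantic_tags)
--     counts = {}
--     for element in elements:
--         tag = element['tag']
--         if not element.get('is_closing') and tag in wanted:
--             counts[tag] = counts.get(tag, 0) + 1
--     return {tag: counts[tag] for tag in semantic_tags if tag in counts}
-- ===== Notes on version B (the rewrite author's own statement) =====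
-- stated objective: alternative
-- what changed: B counts all semantic tags in a single pass over elements into a dict (instead of one full scan of elements per semantic tag, 13 scans), then emits the positive counts in the fixed semantic_tags order.
import Mathlib
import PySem

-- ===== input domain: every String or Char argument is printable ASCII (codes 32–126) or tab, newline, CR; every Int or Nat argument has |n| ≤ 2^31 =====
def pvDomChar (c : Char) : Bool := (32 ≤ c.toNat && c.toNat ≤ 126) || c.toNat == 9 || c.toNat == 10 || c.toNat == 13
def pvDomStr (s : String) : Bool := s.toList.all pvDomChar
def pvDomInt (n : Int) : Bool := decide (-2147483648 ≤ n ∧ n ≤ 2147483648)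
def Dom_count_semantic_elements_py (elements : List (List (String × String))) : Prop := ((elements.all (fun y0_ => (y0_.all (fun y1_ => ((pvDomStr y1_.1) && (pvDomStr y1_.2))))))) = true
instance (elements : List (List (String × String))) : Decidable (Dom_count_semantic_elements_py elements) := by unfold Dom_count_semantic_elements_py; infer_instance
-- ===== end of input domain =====

-- B: one pass over `elements` counting semantic opening tags into a dict, then the positive
-- counts are emitted in the fixed semantic_tags order (A scans `elements` once per tag, 13 times).

-- ===== PORT A =====
-- the literal semantic_tags list (shared constant)
def pvSemanticTags : List String :=
  ["header", "footer", "nav", "main", "article",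
   "section", "aside", "figure", "figcaption",
   "time", "mark", "summary", "details"]

-- element[k] / element.get(k): first-match lookup in the association list
def pvDictGet? (e : List (String × String)) (k : String) : Option String :=
  (e.find? (fun p => p.1 == k)).map (·.2)

-- `not element.get('is_closing')`: true iff the key is absent or its value is the empty (falsy) string
def pvNotTruthy (o : Option String) : Bool :=
  match o with
  | none => true
  | some s => s == ""

def count_semantic_elements_py (elements : List (List (String × String))) : List (String × Int) :=
  (pvSemanticTags.foldl
    (fun counts tag =>
      let count : Int := elements.foldl
        (fun s element =>
          if (pvDictGet? element "tag" == some tag) && pvNotTruthy (pvDictGet? element "is_closing")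
          then s + 1 else s) 0
      if count > 0 then counts.insert tag count else counts)
    (PySem.Dict.empty : PySem.Dict String Int)).items

-- ===== PORT B =====
def count_semantic_elements_py_alt (elements : List (List (String × String))) : List (String × Int) :=
  let wanted : PySem.Set String := PySem.Set.ofList pvSemanticTags
  let counts : PySem.Dict String Int := elements.foldl
    (fun d element =>
      match pvDictGet? element "tag" with
      | none => d      -- Python raises KeyError here; such inputs are excluded by Pre_
      | some tag =>
        if pvNotTruthy (pvDictGet? element "is_closing") && wanted.contains tag
        then d.insert tag (d.getD tag 0 + 1) else d)
    PySem.Dict.empty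
  (pvSemanticTags.foldl
    (fun out tag =>
      if counts.contains tag then out.insert tag (counts.getD tag 0) else out)
    (PySem.Dict.empty : PySem.Dict String Int)).items

-- ===== PRECONDITION & SPEC =====
-- Pre_ excludes exactly the inputs with an element lacking the 'tag' key, on which the Python A
-- (and B) raises KeyError; it excludes nothing on which A returns.
def Pre_count_semantic_elements_py (elements : List (List (String × String))) : Prop :=
  (elements.all (fun e => (pvDictGet? e "tag").isSome)) = true
instance (elements : List (List (String × String))) : Decidable (Pre_count_semantic_elements_py elements) := by unfold Pre_count_semantic_elements_py; infer_instance

def pvWitness_count_semantic_elements_py : (List (List (String × String))) :=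
  [[("tag", "header")], [("tag", "nav"), ("is_closing", "1")], [("tag", "div")]]

def Spec_count_semantic_elements_py (elements : List (List (String × String))) (out : List (String × Int)) : Prop := out = count_semantic_elements_py_alt elements
instance (elements : List (List (String × String))) (out : List (String × Int)) : Decidable (Spec_count_semantic_elements_py elements out) := by unfold Spec_count_semantic_elements_py; infer_instance

-- ===== CLAIM (what is proved, stated in full; the proofs are below) =====
def Claim_equal_count_semantic_elements_py : Prop := ∀ (elements : List (List (String × String))), Dom_count_semantic_elements_py elements → Pre_count_semantic_elements_py elements → Spec_count_semantic_elements_py elements (count_semantic_elements_py elements)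

-- ===== LEMMAS AND PROOFS =====

-- the predicate A's inner generator counts, for a fixed tag
def pvMatches (tag : String) (element : List (String × String)) : Bool :=
  (pvDictGet? element "tag" == some tag) && pvNotTruthy (pvDictGet? element "is_closing")

-- the per-element emission of B's counting pass
def pvEmit (element : List (String × String)) : Option String :=
  match pvDictGet? element "tag" with
  | none => none
  | some tag =>
    if pvNotTruthy (pvDictGet? element "is_closing") && (PySem.Set.ofList pvSemanticTags).contains tag
    then some tag else none

-- the list of counted tag occurrences underlying B's single pass
def pvCounted (elements : List (List (String × String))) : List String :=
  elements.filterMap pvEmit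

-- B's counting loop is the counting loop over pvCounted
lemma pvLoop_eq_counted (elements : List (List (String × String)))
    (d : PySem.Dict String Int) :
    elements.foldl
      (fun d element =>
        match pvDictGet? element "tag" with
        | none => d
        | some tag =>
          if pvNotTruthy (pvDictGet? element "is_closing") && (PySem.Set.ofList pvSemanticTags).contains tag
          then d.insert tag (d.getD tag 0 + 1) else d) d
    = (pvCounted elements).foldl (fun d x => d.insert x (d.getD x 0 + 1)) d := by
  rw [pvCounted, List.foldl_filterMap]
  apply PySem.List.foldl_congr_mem
  intro acc e _
  cases hv : pvDictGet? e "tag" with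
  | none => simp [pvEmit, hv]
  | some t =>
    by_cases hnt : pvNotTruthy (pvDictGet? e "is_closing") = true <;>
      by_cases hs : t ∈ pvSemanticTags <;>
      simp [pvEmit, hv, hnt, hs]

-- B's emission hits tag exactly on the elements A's generator counts for tag
lemma pvPred_eq (tag : String) (htag : tag ∈ pvSemanticTags) (e : List (String × String)) :
    (pvEmit e == some tag) = pvMatches tag e := by
  unfold pvEmit
  cases hv : pvDictGet? e "tag" with
  | none => simp [pvMatches, hv]
  | some t =>
    by_cases ht : t = tag
    · subst ht
      cases hnt : pvNotTruthy (pvDictGet? e "is_closing") <;> simp [pvMatches, hv, hnt, htag]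
    · cases hnt : pvNotTruthy (pvDictGet? e "is_closing") <;>
        by_cases hs : t ∈ pvSemanticTags <;>
        simp [pvMatches, hv, hnt, hs, ht]

-- occurrences of a semantic tag in pvCounted = A's per-tag count
lemma pvCount_counted (elements : List (List (String × String))) (tag : String)
    (htag : tag ∈ pvSemanticTags) :
    (pvCounted elements).count tag = elements.countP (pvMatches tag) := by
  rw [pvCounted, List.count_filterMap]
  exact List.countP_congr (fun e _ => by rw [pvPred_eq tag htag e])

-- A's inner sum(...) fold is a countP
lemma pvInner_eq_countP (elements : List (List (String × String))) (tag : String) :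
    elements.foldl
      (fun s element =>
        if (pvDictGet? element "tag" == some tag) && pvNotTruthy (pvDictGet? element "is_closing")
        then s + 1 else s) (0 : Int)
    = (elements.countP (pvMatches tag) : Int) := by
  simpa [pvMatches] using PySem.List.foldl_count_if (pvMatches tag) elements 0

-- ===== VERDICT (by name: the statement is the Claim_ definition above) =====
theorem count_semantic_elements_py_spec : Claim_equal_count_semantic_elements_py := by
  intro elements _ _
  unfold Spec_count_semantic_elements_py
  simp only [count_semantic_elements_py, count_semantic_elements_py_alt]
  rw [pvLoop_eq_counted, PySem.Dict.foldl_insert_getD_add_one_eq_counter]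
  congr 1
  apply PySem.List.foldl_congr_mem
  intro acc tag htag
  rw [pvInner_eq_countP, PySem.Dict.contains_counter, PySem.Dict.getD_counter,
      pvCount_counted elements tag htag]
  by_cases hP : 0 < elements.countP (pvMatches tag)
  · have hmem : tag ∈ pvCounted elements := by
      refine List.count_pos_iff.mp ?_
      rw [pvCount_counted elements tag htag]; exact hP
    rw [if_pos (by exact_mod_cast hP), if_pos (List.contains_iff_mem.mpr hmem)]
  · have hz : elements.countP (pvMatches tag) = 0 := Nat.eq_zero_of_not_pos hP
    have hnm : tag ∉ pvCounted elements := fun hm =>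
      hP (by rw [← pvCount_counted elements tag htag]; exact List.count_pos_iff.mpr hm)
    rw [if_neg (by simp [hz]), if_neg (by simp [hnm])]
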